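-- pv_equiv track=rewrite | github.com/Alibest3/IUST-DA-Course | DA Exercises/ex-3/q1/Untitled-1.py | segregate_even_odd
-- ===== SOURCE A (Python) =====
-- def segregate_even_odd(arr):
--     n = len(arr)
--     swaps = 0
--     for i in range(n):
--         if arr[i] % 2 == 0:
--             for j in range(i+1, n):
--                 if arr[j] % 2 == 1:
--                     arr[i], arr[j] = arr[j], arr[i]
--                     swaps += 1
--                     break
--
--     return swaps
-- ===== SOURCE B (Python) =====
-- def segregate_even_odd(arr):
--     # B: closed-form count — swaps = (#odds) - (length of the all-odd prefix); no mutation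
--     # (A mutates arr in place; this equivalence is about the RETURN value only)
--     odds = sum(1 for x in arr if x % 2 == 1)
--     p = 0
--     while p < len(arr) and arr[p] % 2 == 1:
--         p += 1
--     return odds - p
-- ===== Notes on version B (the rewrite author's own statement) =====
-- stated objective: alternative
-- what changed: Replaced A's nested index loops with in-place swapping by a closed-form count: swaps = (number of odd elements) - (length of the leading all-odd prefix), computed in one linear pass each, without mutating the list.
import Mathlib
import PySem

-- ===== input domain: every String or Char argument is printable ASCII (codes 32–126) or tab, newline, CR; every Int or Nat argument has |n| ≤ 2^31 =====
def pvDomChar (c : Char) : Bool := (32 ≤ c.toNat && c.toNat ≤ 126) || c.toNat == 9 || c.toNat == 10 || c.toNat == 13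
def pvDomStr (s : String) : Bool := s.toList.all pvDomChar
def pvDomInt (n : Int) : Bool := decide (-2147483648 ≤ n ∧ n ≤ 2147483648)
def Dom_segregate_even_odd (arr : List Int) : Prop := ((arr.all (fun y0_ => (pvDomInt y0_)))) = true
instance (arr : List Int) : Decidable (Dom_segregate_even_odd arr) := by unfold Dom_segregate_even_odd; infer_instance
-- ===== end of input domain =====

-- B computes A's swap count by a closed form ((#odds) - (all-odd prefix length)) instead of
-- A's nested swapping loops; A mutates arr in place, so the equivalence is about the RETURN value only.

-- ===== PORT A =====
-- inner 'for j in range(i+1, n): if arr[j] % 2 == 1: ... break' — find the first such j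
def pvFirstOdd (a : List Int) : List Nat → Option Nat
  | [] => none
  | j :: js => if PySem.Int.mod (a.getD j 0) 2 = 1 then some j else pvFirstOdd a js

-- 'arr[i], arr[j] = arr[j], arr[i]' (RHS read from the pre-swap array, as in Python)
def pvSwap (a : List Int) (i j : Nat) : List Int :=
  (a.set i (a.getD j 0)).set j (a.getD i 0)

-- one iteration of the outer 'for i in range(n)' loop; state = (arr, swaps); indices are in range
def pvStepA (n : Nat) (s : List Int × Int) (i : Nat) : List Int × Int :=
  if PySem.Int.mod (s.1.getD i 0) 2 = 0 then
    match pvFirstOdd s.1 (List.range' (i + 1) (n - (i + 1))) with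
    | some j => (pvSwap s.1 i j, s.2 + 1)
    | none => s
  else s

def segregate_even_odd (arr : List Int) : Int :=
  ((List.range arr.length).foldl (pvStepA arr.length) (arr, 0)).2

-- ===== PORT B =====
-- 'while p < len(arr) and arr[p] % 2 == 1: p += 1'
def pvOddPrefixLen : List Int → Nat
  | [] => 0
  | x :: xs => if PySem.Int.mod x 2 = 1 then pvOddPrefixLen xs + 1 else 0

def segregate_even_odd_alt (arr : List Int) : Int :=
  let odds := (arr.filter (fun x => PySem.Int.mod x 2 == 1)).length
  (odds : Int) - (pvOddPrefixLen arr : Int)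

-- ===== PRECONDITION & SPEC =====
def Spec_segregate_even_odd (arr : List Int) (out : Int) : Prop := out = segregate_even_odd_alt arr
instance (arr : List Int) (out : Int) : Decidable (Spec_segregate_even_odd arr out) := by unfold Spec_segregate_even_odd; infer_instance

-- ===== CLAIM (what is proved, stated in full; the proofs are below) =====
def Claim_equal_segregate_even_odd : Prop := ∀ (arr : List Int), Dom_segregate_even_odd arr → Spec_segregate_even_odd arr (segregate_even_odd arr)

-- ===== LEMMAS AND PROOFS =====

theorem pvMod2 (y : Int) : PySem.Int.mod y 2 = y % 2 :=
  PySem.Int.mod_eq_emod_of_pos (by norm_num)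

-- first-odd decomposition of a list: some (E, o, r) with E the even prefix, o the first odd
def pvSplit : List Int → Option (List Int × Int × List Int)
  | [] => none
  | y :: ys =>
    if PySem.Int.mod y 2 = 1 then some ([], y, ys)
    else match pvSplit ys with
      | some (E, o, r) => some (y :: E, o, r)
      | none => none

theorem pvSplit_some {r E : List Int} {o : Int} {r' : List Int}
    (h : pvSplit r = some (E, o, r')) :
    r = E ++ o :: r' ∧ PySem.Int.mod o 2 = 1 ∧ ∀ y ∈ E, PySem.Int.mod y 2 ≠ 1 := by
  induction r generalizing E o r' with
  | nil => simp [pvSplit] at h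
  | cons y ys ih =>
    by_cases hy : PySem.Int.mod y 2 = 1
    · simp only [pvSplit] at h
      rw [if_pos hy] at h
      simp only [Option.some.injEq, Prod.mk.injEq] at h
      obtain ⟨h1, h2, h3⟩ := h
      subst h1; subst h2; subst h3
      exact ⟨by simp, hy, by simp⟩
    · simp only [pvSplit] at h
      rw [if_neg hy] at h
      cases hs : pvSplit ys with
      | none => rw [hs] at h; simp at h
      | some t =>
        obtain ⟨E0, o0, r0⟩ := t
        rw [hs] at h
        simp only [Option.some.injEq, Prod.mk.injEq] at h
        obtain ⟨h1, h2, h3⟩ := h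
        obtain ⟨hr, ho, hE⟩ := ih hs
        subst h1; subst h2; subst h3
        refine ⟨by rw [hr]; simp, ho, ?_⟩
        intro z hz
        rcases List.mem_cons.mp hz with hz | hz
        · subst hz; exact hy
        · exact hE z hz

theorem pvSplit_none {r : List Int} (h : pvSplit r = none) :
    ∀ y ∈ r, PySem.Int.mod y 2 ≠ 1 := by
  induction r with
  | nil => simp
  | cons y ys ih =>
    by_cases hy : PySem.Int.mod y 2 = 1
    · simp only [pvSplit] at h
      rw [if_pos hy] at h
      simp at h
    · simp only [pvSplit] at h
      rw [if_neg hy] at h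
      cases hs : pvSplit ys with
      | none =>
        intro z hz
        rcases List.mem_cons.mp hz with hz | hz
        · subst hz; exact hy
        · exact ih hs z hz
      | some t => obtain ⟨E0, o0, r0⟩ := t; rw [hs] at h; simp at h

theorem pvSplit_length {r E : List Int} {o : Int} {r' : List Int}
    (h : pvSplit r = some (E, o, r')) : r.length = E.length + 1 + r'.length := by
  obtain ⟨hr, -, -⟩ := pvSplit_some h
  subst hr; simp; omega

-- proof-side recursion that mirrors the whole outer loop of A on the un-placed suffix
def pvG : List Int → Int → Int
  | [], sw => sw
  | x :: rest, sw =>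
    if PySem.Int.mod x 2 = 1 then pvG rest sw
    else match h : pvSplit rest with
      | some (E, _, r') => pvG (E ++ x :: r') (sw + 1)
      | none => pvG rest sw
termination_by l _ => l.length
decreasing_by
  · simp
  · have := pvSplit_length h; simp; omega
  · simp

theorem pvG_cons_odd {x : Int} {rest : List Int} {sw : Int}
    (hx : PySem.Int.mod x 2 = 1) : pvG (x :: rest) sw = pvG rest sw := by
  simp only [pvG]
  rw [if_pos hx]

theorem pvG_cons_even_some {x : Int} {rest E : List Int} {o sw : Int} {r' : List Int}
    (hx : ¬ PySem.Int.mod x 2 = 1) (hs : pvSplit rest = some (E, o, r')) :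
    pvG (x :: rest) sw = pvG (E ++ x :: r') (sw + 1) := by
  simp only [pvG]
  rw [if_neg hx]
  split
  · next E0 o0 r0 heq => rw [hs] at heq; cases heq; rfl
  · next heq => rw [hs] at heq; cases heq

theorem pvG_cons_even_none {x : Int} {rest : List Int} {sw : Int}
    (hx : ¬ PySem.Int.mod x 2 = 1) (hs : pvSplit rest = none) :
    pvG (x :: rest) sw = pvG rest sw := by
  simp only [pvG]
  rw [if_neg hx]
  split
  · next E0 o0 r0 heq => rw [hs] at heq; cases heq
  · next heq => rfl

theorem pvGetD_junction : ∀ (pre : List Int) (x : Int) (rest : List Int),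
    (pre ++ x :: rest).getD pre.length 0 = x := by
  intro pre x rest
  induction pre with
  | nil => simp
  | cons p ps ih => simpa using ih

theorem pvSet_junction : ∀ (pre : List Int) (x v : Int) (rest : List Int),
    (pre ++ x :: rest).set pre.length v = pre ++ v :: rest := by
  intro pre x v rest
  induction pre with
  | nil => simp
  | cons p ps ih => simpa using ih

theorem pvFirstOdd_bridge : ∀ (rest pre : List Int),
    pvFirstOdd (pre ++ rest) (List.range' pre.length rest.length)
      = (pvSplit rest).map (fun t => pre.length + t.1.length) := by
  intro rest
  induction rest with
  | nil => intro pre; simp [pvFirstOdd, pvSplit]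
  | cons y ys ih =>
    intro pre
    rw [List.length_cons, List.range'_succ]
    simp only [pvFirstOdd]
    rw [pvGetD_junction]
    by_cases hy : PySem.Int.mod y 2 = 1
    · rw [if_pos hy]
      simp only [pvSplit]
      rw [if_pos hy]
      simp
    · rw [if_neg hy]
      have h := ih (pre ++ [y])
      have e : (pre ++ [y]).length = pre.length + 1 := by simp
      rw [e, List.append_assoc, List.singleton_append] at h
      rw [h]
      simp only [pvSplit]
      rw [if_neg hy]
      cases hs : pvSplit ys with
      | none => rfl
      | some t =>
        obtain ⟨E0, o0, r0⟩ := t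
        simp
        omega

theorem pvFirstOdd_bridge' (rest pre : List Int) (x : Int) :
    pvFirstOdd (pre ++ x :: rest) (List.range' (pre.length + 1) rest.length)
      = (pvSplit rest).map (fun t => pre.length + 1 + t.1.length) := by
  have h := pvFirstOdd_bridge rest (pre ++ [x])
  have e : (pre ++ [x]).length = pre.length + 1 := by simp
  rw [e, List.append_assoc, List.singleton_append] at h
  exact h

theorem pvSwap_eq (pre : List Int) (x : Int) (E : List Int) (o : Int) (r' : List Int) :
    pvSwap (pre ++ x :: (E ++ o :: r')) pre.length (pre.length + 1 + E.length)
      = pre ++ o :: (E ++ x :: r') := by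
  have hj : (pre ++ x :: (E ++ o :: r')) = (pre ++ x :: E) ++ o :: r' := by simp
  have hlen : (pre ++ x :: E).length = pre.length + 1 + E.length := by simp; omega
  unfold pvSwap
  have hgj : (pre ++ x :: (E ++ o :: r')).getD (pre.length + 1 + E.length) 0 = o := by
    rw [hj, ← hlen, pvGetD_junction]
  have hgi : (pre ++ x :: (E ++ o :: r')).getD pre.length 0 = x := pvGetD_junction ..
  rw [hgj, hgi, pvSet_junction]
  have hj2 : (pre ++ o :: (E ++ o :: r')) = (pre ++ o :: E) ++ o :: r' := by simp
  have hlen2 : (pre ++ o :: E).length = pre.length + 1 + E.length := by simp; omega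
  rw [hj2, ← hlen2, pvSet_junction]
  simp

theorem pvMainA : ∀ (m : Nat) (r pre : List Int) (sw : Int) (n : Nat),
    r.length ≤ m → n = pre.length + r.length →
    ((List.range' pre.length r.length).foldl (pvStepA n) (pre ++ r, sw)).2 = pvG r sw := by
  intro m
  induction m with
  | zero =>
    intro r pre sw n hm _
    have : r = [] := List.length_eq_zero_iff.mp (Nat.le_zero.mp hm)
    subst this
    simp [pvG]
  | succ m ih =>
    intro r pre sw n hm hn
    cases r with
    | nil => simp [pvG]
    | cons x rest =>
      rw [List.length_cons, List.range'_succ, List.foldl_cons]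
      have hstep0 : (pre ++ x :: rest).getD pre.length 0 = x := pvGetD_junction ..
      have hrm : rest.length ≤ m := by simp at hm; omega
      have hpre1 : (pre ++ [x]).length = pre.length + 1 := by simp
      by_cases hx : PySem.Int.mod x 2 = 1
      · have hne : ¬ PySem.Int.mod x 2 = 0 := by rw [pvMod2] at hx ⊢; omega
        have hstep : pvStepA n (pre ++ x :: rest, sw) pre.length = (pre ++ x :: rest, sw) := by
          simp only [pvStepA]
          rw [hstep0, if_neg hne]
        rw [hstep]
        have hrec := ih rest (pre ++ [x]) sw n hrm (by simp at hn ⊢; omega)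
        rw [hpre1, List.append_assoc, List.singleton_append] at hrec
        rw [hrec, pvG_cons_odd hx]
      · have hx0 : PySem.Int.mod x 2 = 0 := by rw [pvMod2] at hx ⊢; omega
        have hcnt : n - (pre.length + 1) = rest.length := by simp at hn; omega
        have hbr := pvFirstOdd_bridge' rest pre x
        cases hs : pvSplit rest with
        | none =>
          have hstep : pvStepA n (pre ++ x :: rest, sw) pre.length = (pre ++ x :: rest, sw) := by
            simp only [pvStepA]
            rw [hstep0, if_pos hx0, hcnt, hbr, hs]
            rfl
          rw [hstep]
          have hrec := ih rest (pre ++ [x]) sw n hrm (by simp at hn ⊢; omega)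
          rw [hpre1, List.append_assoc, List.singleton_append] at hrec
          rw [hrec, pvG_cons_even_none hx hs]
        | some t =>
          obtain ⟨E, o, r'⟩ := t
          obtain ⟨hr, ho, hE⟩ := pvSplit_some hs
          have hstep : pvStepA n (pre ++ x :: rest, sw) pre.length
              = (pre ++ o :: (E ++ x :: r'), sw + 1) := by
            simp only [pvStepA]
            rw [hstep0, if_pos hx0, hcnt, hbr, hs]
            simp only [Option.map_some]
            show (pvSwap (pre ++ x :: rest) pre.length (pre.length + 1 + E.length), sw + 1)
              = (pre ++ o :: (E ++ x :: r'), sw + 1)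
            rw [hr, pvSwap_eq]
          rw [hstep]
          have hlenr : (E ++ x :: r').length = rest.length := by rw [hr]; simp
          have hpre1o : (pre ++ [o]).length = pre.length + 1 := by simp
          have hrec := ih (E ++ x :: r') (pre ++ [o]) (sw + 1) n
            (by rw [hlenr]; exact hrm)
            (by rw [hlenr]; simp at hn ⊢; omega)
          rw [hpre1o, List.append_assoc, List.singleton_append, hlenr] at hrec
          rw [hrec, pvG_cons_even_some hx hs]

-- closed form for pvG
theorem pvOddPrefixLen_even_head {E : List Int} {x : Int} (r : List Int)
    (hE : ∀ y ∈ E, PySem.Int.mod y 2 ≠ 1) (hx : PySem.Int.mod x 2 ≠ 1) :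
    pvOddPrefixLen (E ++ x :: r) = 0 := by
  cases E with
  | nil =>
    rw [List.nil_append]
    simp only [pvOddPrefixLen]
    rw [if_neg hx]
  | cons y ys =>
    rw [List.cons_append]
    simp only [pvOddPrefixLen]
    rw [if_neg (hE y (by simp))]

theorem pvCountOdd_all_even {r : List Int} (h : ∀ y ∈ r, PySem.Int.mod y 2 ≠ 1) :
    r.filter (fun x => PySem.Int.mod x 2 == 1) = [] := by
  rw [List.filter_eq_nil_iff]
  intro y hy
  simpa using h y hy

theorem pvG_closed : ∀ (r : List Int) (sw : Int),
    pvG r sw = sw + ((r.filter (fun x => PySem.Int.mod x 2 == 1)).length : Int)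
      - (pvOddPrefixLen r : Int) := by
  intro r sw
  induction r, sw using pvG.induct with
  | case1 sw => simp [pvG, pvOddPrefixLen]
  | case2 x rest sw hx ih =>
    rw [pvG_cons_odd hx, ih]
    rw [List.filter_cons_of_pos (by simpa using hx)]
    have h1 : pvOddPrefixLen (x :: rest) = pvOddPrefixLen rest + 1 := by
      simp only [pvOddPrefixLen]
      rw [if_pos hx]
    rw [h1, List.length_cons]
    push_cast
    ring
  | case3 x rest sw hx E o r' hs ih =>
    obtain ⟨hr, ho, hE⟩ := pvSplit_some hs
    rw [pvG_cons_even_some hx hs, ih]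
    rw [pvOddPrefixLen_even_head r' hE hx]
    have h1 : pvOddPrefixLen (x :: rest) = 0 := by
      simp only [pvOddPrefixLen]
      rw [if_neg hx]
    rw [h1]
    subst hr
    have hEf : E.filter (fun y => PySem.Int.mod y 2 == 1) = [] := pvCountOdd_all_even hE
    have e1 : (E ++ x :: r').filter (fun y => PySem.Int.mod y 2 == 1)
        = r'.filter (fun y => PySem.Int.mod y 2 == 1) := by
      rw [List.filter_append, hEf, List.filter_cons_of_neg (by simpa using hx), List.nil_append]
    have e2 : (x :: (E ++ o :: r')).filter (fun y => PySem.Int.mod y 2 == 1)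
        = o :: r'.filter (fun y => PySem.Int.mod y 2 == 1) := by
      rw [List.filter_cons_of_neg (by simpa using hx), List.filter_append, hEf,
        List.filter_cons_of_pos (by simpa using ho), List.nil_append]
    rw [e1, e2, List.length_cons]
    push_cast
    ring
  | case4 x rest sw hx hs ih =>
    rw [pvG_cons_even_none hx hs, ih]
    have hall := pvSplit_none hs
    have h1 : pvOddPrefixLen (x :: rest) = 0 := by
      simp only [pvOddPrefixLen]
      rw [if_neg hx]
    have h2 : pvOddPrefixLen rest = 0 := by
      cases rest with
      | nil => rfl
      | cons y ys =>
        simp only [pvOddPrefixLen]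
        rw [if_neg (hall y (by simp))]
    have e1 : (x :: rest).filter (fun y => PySem.Int.mod y 2 == 1)
        = rest.filter (fun y => PySem.Int.mod y 2 == 1) :=
      List.filter_cons_of_neg (by simpa using hx)
    rw [h1, h2, e1]

-- ===== VERDICT (by name: the statement is the Claim_ definition above) =====
theorem segregate_even_odd_spec : Claim_equal_segregate_even_odd := by
  intro arr _
  unfold Spec_segregate_even_odd segregate_even_odd segregate_even_odd_alt
  rw [List.range_eq_range']
  have := pvMainA arr.length arr [] 0 arr.length (le_refl _) (by simp)
  simp only [List.nil_append, List.length_nil] at this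
  rw [this, pvG_closed]
  ring
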